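-- pv_equiv track=rewrite | github.com/chris0leite-ui/kaggle-perfect-fit | src/causal.py | consensus_graph
-- ===== SOURCE A (Python) =====
-- from collections import Counter
--
-- def consensus_graph(
--     edge_lists: list[list[tuple[str, str, ...]]],
--     min_methods: int = 2,
-- ) -> list[tuple[str, str]]:
--     """Return directed edges that appear in at least *min_methods* edge lists.
--
--     Each edge list is a sequence of tuples whose first two elements are
--     ``(cause, effect)``. Extra elements (weights) are ignored.
--     """
--     counter: Counter[tuple[str, str]] = Counter()
--     for edges in edge_lists:
--         # Deduplicate within a single method
--         seen: set[tuple[str, str]] = set()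
--         for e in edges:
--             pair = (e[0], e[1])
--             if pair not in seen:
--                 seen.add(pair)
--                 counter[pair] += 1
--     return [pair for pair, count in counter.items() if count >= min_methods]
-- ===== SOURCE B (Python) =====
-- def consensus_graph(
--     edge_lists: list[list[tuple[str, str, ...]]],
--     min_methods: int = 2,
-- ) -> list[tuple[str, str]]:
--     """Return directed edges that appear in at least *min_methods* edge lists.
--
--     Two staged passes instead of one-pass counting: first collect the distinct
--     (cause, effect) pairs in first-occurrence order, then for each candidate
--     pair recount its support against the per-list pair sets.
--     """
--     candidates = dict.fromkeys(
--         (e[0], e[1]) for edges in edge_lists for e in edges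
--     )
--     pair_sets = [{(e[0], e[1]) for e in edges} for edges in edge_lists]
--     return [
--         p for p in candidates
--         if sum(p in s for s in pair_sets) >= min_methods
--     ]
-- ===== Notes on version B (the rewrite author's own statement) =====
-- stated objective: alternative
-- what changed: B replaces A's single-pass Counter-with-per-list-dedup by two staged passes: it first collects the distinct (cause, effect) pairs in first-occurrence order (dict.fromkeys of the flattened pairs) and builds the per-list pair sets, then for each candidate recounts its support by membership against those sets, keeping no running counter or per-list seen loop at all.
import Mathlib
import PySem

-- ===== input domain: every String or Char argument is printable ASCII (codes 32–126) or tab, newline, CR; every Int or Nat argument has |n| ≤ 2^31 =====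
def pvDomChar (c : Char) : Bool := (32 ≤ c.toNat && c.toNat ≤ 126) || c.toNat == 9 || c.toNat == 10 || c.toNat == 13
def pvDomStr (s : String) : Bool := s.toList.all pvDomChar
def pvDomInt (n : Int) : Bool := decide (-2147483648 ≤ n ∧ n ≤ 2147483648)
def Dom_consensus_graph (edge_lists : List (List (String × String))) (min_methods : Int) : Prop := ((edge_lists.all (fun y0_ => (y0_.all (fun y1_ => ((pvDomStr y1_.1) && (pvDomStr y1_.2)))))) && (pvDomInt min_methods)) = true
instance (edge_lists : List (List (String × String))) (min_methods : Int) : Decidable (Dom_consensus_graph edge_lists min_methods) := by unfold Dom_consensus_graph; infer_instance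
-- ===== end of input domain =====

-- B is a staged re-implementation: collect the distinct pairs first, then recount each pair's
-- support by rescanning all lists; objective: alternative (no counter, no per-list seen set).

-- ===== PORT A =====
def consensus_graph (edge_lists : List (List (String × String))) (min_methods : Int) : List (String × String) :=
  let counter : PySem.Dict (String × String) Int :=
    edge_lists.foldl (fun counter edges =>
      -- seen = set(); for e in edges: pair = (e[0], e[1]); if pair not in seen: seen.add(pair); counter[pair] += 1
      (edges.foldl (fun (st : PySem.Set (String × String) × PySem.Dict (String × String) Int) e =>
          let pair := (e.1, e.2)
          if st.1.contains pair then st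
          else (st.1.add pair, st.2.modify pair 0 (· + 1)))
        (PySem.Set.empty, counter)).2)
      PySem.Dict.empty
  (counter.items.filter (fun pc => decide (min_methods ≤ pc.2))).map (·.1)

-- ===== PORT B =====
def consensus_graph_alt (edge_lists : List (List (String × String))) (min_methods : Int) : List (String × String) :=
  -- candidates = dict.fromkeys((e[0], e[1]) for edges in edge_lists for e in edges)
  let candidates : List (String × String) :=
    PySem.List.dedup (edge_lists.flatMap (fun edges => edges.map (fun e => (e.1, e.2))))
  -- pair_sets = [{(e[0], e[1]) for e in edges} for edges in edge_lists]
  let pair_sets : List (PySem.Set (String × String)) :=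
    edge_lists.map (fun edges => PySem.Set.ofList (edges.map (fun e => (e.1, e.2))))
  -- sum(p in s for s in pair_sets)
  candidates.filter (fun p => decide (min_methods ≤ (pair_sets.countP (fun s => s.contains p) : Int)))

-- ===== PRECONDITION & SPEC =====
def Spec_consensus_graph (edge_lists : List (List (String × String))) (min_methods : Int) (out : List (String × String)) : Prop := out = consensus_graph_alt edge_lists min_methods
instance (edge_lists : List (List (String × String))) (min_methods : Int) (out : List (String × String)) : Decidable (Spec_consensus_graph edge_lists min_methods out) := by unfold Spec_consensus_graph; infer_instance

-- ===== CLAIM (what is proved, stated in full; the proofs are below) =====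
def Claim_equal_consensus_graph : Prop := ∀ (edge_lists : List (List (String × String))) (min_methods : Int), Dom_consensus_graph edge_lists min_methods → Spec_consensus_graph edge_lists min_methods (consensus_graph edge_lists min_methods)

-- ===== LEMMAS AND PROOFS =====

theorem set_update_append {α : Type} [BEq α] (s : PySem.Set α) (a b : List α) :
    PySem.Set.update s (a ++ b) = PySem.Set.update (PySem.Set.update s a) b := by
  simp [PySem.Set.update, List.foldl_append]

theorem keys_modify_eq_add {κ ν : Type} [BEq κ] [LawfulBEq κ]
    (c : PySem.Dict κ ν) (k : κ) (d0 : ν) (f : ν → ν) :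
    (c.modify k d0 f).keys = PySem.Set.add c.keys k := by
  rw [PySem.Dict.keys_modify]
  by_cases h : c.contains k
  · rw [PySem.Dict.keys_insert_of_contains _ _ h]
    have hm : k ∈ c.keys := (PySem.Dict.contains_iff_mem_keys c k).mp h
    simp [PySem.Set.add, hm]
  · rw [PySem.Dict.keys_insert_of_not_contains _ _ (by simpa using h)]
    have hm : k ∉ c.keys := fun hc => h ((PySem.Dict.contains_iff_mem_keys c k).mpr hc)
    simp [PySem.Set.add, hm]

theorem innerA_keys (l : List (String × String))
    (seen : PySem.Set (String × String)) (c : PySem.Dict (String × String) Int)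
    (hsub : ∀ x ∈ seen, x ∈ c.keys) :
    ((l.foldl (fun (st : PySem.Set (String × String) × PySem.Dict (String × String) Int) e =>
        let pair := (e.1, e.2)
        if st.1.contains pair then st
        else (st.1.add pair, st.2.modify pair 0 (· + 1)))
      (seen, c)).2.keys)
    = PySem.Set.update c.keys l := by
  induction l generalizing seen c with
  | nil => simp [PySem.Set.update]
  | cons x rest ih =>
    simp only [List.foldl_cons]
    have hupd : PySem.Set.update c.keys (x :: rest)
        = PySem.Set.update (PySem.Set.add c.keys x) rest := rfl
    by_cases hx : seen.contains (x.1, x.2)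
    · rw [if_pos hx, ih _ _ hsub, hupd]
      have hxk : x ∈ c.keys := hsub x (List.contains_iff_mem.mp hx)
      have : PySem.Set.add c.keys x = c.keys := by
        simp [PySem.Set.add, hxk]
      rw [this]
    · rw [if_neg hx]
      rw [ih]
      · rw [keys_modify_eq_add, hupd]
      · intro y hy
        rw [keys_modify_eq_add]
        rcases (PySem.Set.mem_add _ _ _).mp hy with hy | hy
        · exact (PySem.Set.mem_add _ _ _).mpr (Or.inl (hsub y hy))
        · exact (PySem.Set.mem_add _ _ _).mpr (Or.inr (by simpa using hy))

theorem innerA_getD (l : List (String × String))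
    (seen : PySem.Set (String × String)) (c : PySem.Dict (String × String) Int)
    (p : String × String) :
    ((l.foldl (fun (st : PySem.Set (String × String) × PySem.Dict (String × String) Int) e =>
        let pair := (e.1, e.2)
        if st.1.contains pair then st
        else (st.1.add pair, st.2.modify pair 0 (· + 1)))
      (seen, c)).2.getD p 0)
    = c.getD p 0 + (if p ∈ l ∧ p ∉ seen then 1 else 0) := by
  induction l generalizing seen c with
  | nil => simp
  | cons x rest ih =>
    simp only [List.foldl_cons]
    by_cases hx : seen.contains (x.1, x.2)
    · rw [if_pos hx, ih]
      have hxm : x ∈ seen := by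
        simpa using (List.contains_iff_mem.mp hx)
      by_cases hp : p = x
      · subst hp; simp [hxm]
      · have : (p ∈ x :: rest ∧ p ∉ seen) ↔ (p ∈ rest ∧ p ∉ seen) := by
          constructor
          · rintro ⟨h1, h2⟩; exact ⟨by cases h1 with | head => exact absurd hxm h2 | tail _ h => exact h, h2⟩
          · rintro ⟨h1, h2⟩; exact ⟨List.mem_cons_of_mem _ h1, h2⟩
        rw [if_congr this rfl rfl]
    · rw [if_neg hx, ih, PySem.Dict.getD_modify]
      have hxs : x ∉ seen := by
        intro hm; exact hx (List.contains_iff_mem.mpr (by simpa using hm))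
      by_cases hp : p = x
      · subst hp
        simp [hxs]
      · have hp' : ¬ (p = (x.1, x.2)) := by simpa using hp
        rw [if_neg hp']
        have : (p ∈ rest ∧ p ∉ seen.add (x.1,x.2)) ↔ (p ∈ x :: rest ∧ p ∉ seen) := by
          simp only [PySem.Set.mem_add]
          constructor
          · rintro ⟨h1, h2⟩
            push Not at h2
            exact ⟨List.mem_cons_of_mem _ h1, h2.1⟩
          · rintro ⟨h1, h2⟩
            refine ⟨?_, ?_⟩
            · cases h1 with | head => exact absurd rfl hp | tail _ h => exact h
            · push Not; exact ⟨h2, by simpa using hp⟩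
        rw [if_congr this rfl rfl]

theorem outerA_getD (ll : List (List (String × String))) (c : PySem.Dict (String × String) Int)
    (p : String × String) :
    ((ll.foldl (fun counter edges =>
        (edges.foldl (fun (st : PySem.Set (String × String) × PySem.Dict (String × String) Int) e =>
            let pair := (e.1, e.2)
            if st.1.contains pair then st
            else (st.1.add pair, st.2.modify pair 0 (· + 1)))
          (PySem.Set.empty, counter)).2) c).getD p 0)
    = c.getD p 0 + (ll.countP (fun l => decide (p ∈ l)) : Int) := by
  induction ll generalizing c with
  | nil => simp
  | cons l rest ih =>
    simp only [List.foldl_cons]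
    rw [ih, innerA_getD, List.countP_cons]
    by_cases hm : p ∈ l
    · simp [hm, PySem.Set.empty]
      omega
    · simp [hm, PySem.Set.empty]

theorem outerA_keys (ll : List (List (String × String))) (c : PySem.Dict (String × String) Int) :
    ((ll.foldl (fun counter edges =>
        (edges.foldl (fun (st : PySem.Set (String × String) × PySem.Dict (String × String) Int) e =>
            let pair := (e.1, e.2)
            if st.1.contains pair then st
            else (st.1.add pair, st.2.modify pair 0 (· + 1)))
          (PySem.Set.empty, counter)).2) c).keys)
    = PySem.Set.update c.keys (ll.flatMap id) := by
  induction ll generalizing c with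
  | nil => simp [PySem.Set.update]
  | cons l rest ih =>
    simp only [List.foldl_cons]
    rw [ih, innerA_keys _ _ _ (by simp [PySem.Set.empty]), List.flatMap_cons, set_update_append]
    rfl

theorem main_eq (edge_lists : List (List (String × String))) (min_methods : Int) :
    consensus_graph edge_lists min_methods = consensus_graph_alt edge_lists min_methods := by
  have e1 : consensus_graph edge_lists min_methods
      = (((edge_lists.foldl (fun counter edges =>
            (edges.foldl (fun (st : PySem.Set (String × String) × PySem.Dict (String × String) Int) e =>
                let pair := (e.1, e.2)
                if st.1.contains pair then st
                else (st.1.add pair, st.2.modify pair 0 (· + 1)))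
              (PySem.Set.empty, counter)).2)
          PySem.Dict.empty).items.filter (fun pc => decide (min_methods ≤ pc.2))).map (·.1)) := rfl
  have e2 : consensus_graph_alt edge_lists min_methods
      = ((PySem.List.dedup (edge_lists.flatMap (fun edges => edges.map (fun e => (e.1, e.2))))).filter
          (fun p => decide (min_methods ≤ ((edge_lists.map (fun edges => PySem.Set.ofList (edges.map (fun e => (e.1, e.2))))).countP (fun s => s.contains p) : Int)))) := rfl
  rw [e1, e2]
  have hAkeys := outerA_keys edge_lists PySem.Dict.empty
  have hAnodup : (edge_lists.foldl (fun counter edges =>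
            (edges.foldl (fun (st : PySem.Set (String × String) × PySem.Dict (String × String) Int) e =>
                let pair := (e.1, e.2)
                if st.1.contains pair then st
                else (st.1.add pair, st.2.modify pair 0 (· + 1)))
              (PySem.Set.empty, counter)).2)
          PySem.Dict.empty).keys.Nodup := by
    rw [hAkeys]
    exact PySem.Set.nodup_ofList _
  rw [PySem.Dict.items_eq_map_keys _ hAnodup 0,
      List.filter_map, List.map_map]
  simp only [Function.comp_def]
  rw [List.map_id', hAkeys]
  -- identify the key lists on both sides
  have hflat : edge_lists.flatMap (fun edges => edges.map (fun e => (e.1, e.2)))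
      = edge_lists.flatMap id := by
    simp
  have hkeys : PySem.Set.update (PySem.Dict.empty (κ := String × String) (ν := Int)).keys (edge_lists.flatMap id)
      = PySem.List.dedup (edge_lists.flatMap (fun edges => edges.map (fun e => (e.1, e.2)))) := by
    rw [hflat]
    rfl
  rw [hkeys]
  apply List.filter_congr
  intro k _
  rw [outerA_getD]
  have hpred : edge_lists.countP (fun l => decide (k ∈ l))
      = (edge_lists.map (fun edges => PySem.Set.ofList (edges.map (fun e => (e.1, e.2))))).countP (fun s => s.contains k) := by
    rw [List.countP_map]
    apply List.countP_congr
    intro l _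
    rw [Bool.eq_iff_iff, Function.comp_apply]
    simp only [decide_eq_true_eq, PySem.Set.contains, List.elem_iff, PySem.Set.mem_ofList, List.mem_map]
    constructor
    · intro hm; exact ⟨k, by simpa using hm, rfl⟩
    · rintro ⟨e, he, rfl⟩; simpa using he
  simp [hpred]

-- ===== VERDICT (by name: the statement is the Claim_ definition above) =====
theorem consensus_graph_spec : Claim_equal_consensus_graph := by
  intro edge_lists min_methods _
  unfold Spec_consensus_graph
  exact main_eq edge_lists min_methods
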